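-- pv_equiv track=rewrite | github.com/MolfarUA/CodeWars_Solutions | 1 kyu/RoboScript #5 - The Final Obstacle (Implement RSU)/solution.py | unbracket
-- ===== SOURCE A (Python) =====
-- def unbracket(tokens):
--     stack = []
--     output = []
--     for t in tokens:
--         if t == '(':
--             stack.append(len(output))
--         elif t[0] == ')':
--             if not stack:
--                 raise Exception('Unbalanced brackets')
--             repeat = 1
--             if len(t) > 1:
--                 repeat = int(t[1:])
--             start = stack.pop()
--             block = output[start:]
--             output = output[0:start]
--             for _ in range(repeat):
--                 output.extend(block)
--         else:
--             output.append(t)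
--     if stack:
--         raise Exception('Unbalanced brackets')
--     return output
-- ===== SOURCE B (Python) =====
-- def unbracket(tokens):
--     toks = list(tokens)
--
--     def parse(i, top):
--         out = []
--         while i < len(toks):
--             t = toks[i]
--             if t == '(':
--                 block, i = parse(i + 1, False)
--                 out.extend(block)
--             elif t[0] == ')':
--                 if top:
--                     raise Exception('Unbalanced brackets')
--                 repeat = int(t[1:]) if len(t) > 1 else 1
--                 return out * repeat, i + 1
--             else:
--                 out.append(t)
--                 i += 1
--         if not top:
--             raise Exception('Unbalanced brackets')
--         return out, i
--
--     return parse(0, True)[0]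
-- ===== Notes on version B (the rewrite author's own statement) =====
-- stated objective: alternative
-- what changed: Replaced A's one-pass stack machine (a stack of saved output lengths plus slicing of one flat output list) by a recursive-descent parser over an index: each bracketed block is parsed by a recursive call that builds its own local list and returns it multiplied by the repeat count read from the closing token.
import Mathlib
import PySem

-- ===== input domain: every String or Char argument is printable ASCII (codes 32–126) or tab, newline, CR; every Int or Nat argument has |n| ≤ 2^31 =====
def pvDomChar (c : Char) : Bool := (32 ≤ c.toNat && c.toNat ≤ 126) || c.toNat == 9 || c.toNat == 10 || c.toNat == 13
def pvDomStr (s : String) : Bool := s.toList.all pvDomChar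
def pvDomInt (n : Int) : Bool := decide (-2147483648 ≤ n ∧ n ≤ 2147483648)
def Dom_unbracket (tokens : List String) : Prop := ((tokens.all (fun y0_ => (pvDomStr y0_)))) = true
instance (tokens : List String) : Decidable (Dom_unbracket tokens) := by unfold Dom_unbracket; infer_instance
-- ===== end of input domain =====

-- B re-implements A's stack-machine expansion as a recursive-descent parser (same values wherever A returns; equivalence is about the return value).

-- shared token classification (the literal tests both Pythons make: t == '(' and t[0] == ')')
def pvIsOpen (t : String) : Bool := t.toList = ['(']
def pvIsClose (t : String) : Bool := t.toList.head? = some ')'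
-- repeat count of a closing token: 1, or int(t[1:]) when len(t) > 1 (both Pythons compute this
-- expression verbatim; getD 0 is arbitrary — Python raises ValueError there, outside Pre_)
def pvRep (t : String) : Int :=
  if 1 < t.toList.length then (PySem.Int.ofChars? (t.toList.drop 1)).getD 0 else 1

-- ===== PORT A =====
-- state = (stack of saved output lengths, output); branches where Python raises return the state unchanged (outside Pre_)
def pvStepA (st : List Nat × List String) (t : String) : List Nat × List String :=
  if pvIsOpen t then (st.2.length :: st.1, st.2)
  else if pvIsClose t then
    match st.1 with
    | [] => st  -- Python: raise Exception('Unbalanced brackets')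
    | start :: stk =>
      (stk, (List.range (pvRep t).toNat).foldl (fun o _ => o ++ st.2.drop start) (st.2.take start))
  else (st.1, st.2 ++ [t])

def unbracket (tokens : List String) : List String :=
  (tokens.foldl pvStepA ([], [])).2

-- ===== PORT B =====
-- recursive descent, fuel = number of remaining tokens + 1 (fuel only makes the recursion
-- structural; it is never exhausted).  Result: (local output, remaining tokens, ended-at-')').
-- Python's two 'raise Exception' sites return the state unchanged (outside Pre_).
def pvParse : Nat → List String → List String → List String × List String × Bool
  | _, acc, [] => (acc, [], false)
  | 0, acc, ts => (acc, ts, false)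
  | f + 1, acc, t :: ts =>
    if pvIsOpen t then
      match pvParse f [] ts with
      | (blk, rest, true) => pvParse f (acc ++ blk) rest
      | (blk, rest, false) => (acc ++ blk, rest, false)
    else if pvIsClose t then
      ((List.replicate (pvRep t).toNat acc).flatten, ts, true)
    else pvParse f (acc ++ [t]) ts

def unbracket_alt (tokens : List String) : List String :=
  (pvParse (tokens.length + 1) [] tokens).1

-- ===== PRECONDITION & SPEC =====
-- Pre_ = exactly the inputs where Python A returns: no empty token (IndexError at t[0]),
-- every closing token longer than 1 carries a Python-parsable int (else ValueError),
-- and the brackets are balanced (else Exception('Unbalanced brackets')).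
def Pre_unbracket (tokens : List String) : Prop :=
  (∀ t ∈ tokens, t.toList ≠ []) ∧
  (∀ t ∈ tokens, pvIsClose t = true → 1 < t.toList.length →
      (PySem.Int.ofChars? (t.toList.drop 1)).isSome = true) ∧
  (∀ i < tokens.length + 1,
      (tokens.take i).countP pvIsClose ≤ (tokens.take i).countP pvIsOpen) ∧
  tokens.countP pvIsClose = tokens.countP pvIsOpen

instance (tokens : List String) : Decidable (Pre_unbracket tokens) := by
  unfold Pre_unbracket; infer_instance

def pvWitness_unbracket : List String := ["a", "(", "b", ")2"]

def Spec_unbracket (tokens : List String) (out : List String) : Prop := out = unbracket_alt tokens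
instance (tokens : List String) (out : List String) : Decidable (Spec_unbracket tokens out) := by unfold Spec_unbracket; infer_instance

-- ===== CLAIM (what is proved, stated in full; the proofs are below) =====
def Claim_equal_unbracket : Prop := ∀ (tokens : List String), Dom_unbracket tokens → Pre_unbracket tokens → Spec_unbracket tokens (unbracket tokens)

-- ===== LEMMAS AND PROOFS =====

-- nesting depth checker: pvNest d ts ⇔ starting d brackets deep, ts closes everything exactly
def pvNest : Nat → List String → Bool
  | d, [] => d == 0
  | d, t :: ts =>
    if pvIsOpen t then pvNest (d + 1) ts
    else if pvIsClose t then
      match d with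
      | 0 => false
      | d' + 1 => pvNest d' ts
    else pvNest d ts

theorem pvNest_of_counts : ∀ (ts : List String) (d : Nat),
    (∀ i < ts.length + 1, (ts.take i).countP pvIsClose ≤ (ts.take i).countP pvIsOpen + d) →
    ts.countP pvIsClose = ts.countP pvIsOpen + d →
    pvNest d ts = true := by
  intro ts
  induction ts with
  | nil =>
      intro d _ hf
      have hd : d = 0 := by simp at hf; omega
      subst hd
      simp [pvNest]
  | cons t ts ih =>
      intro d hp hf
      by_cases ho : pvIsOpen t = true
      · have hc : pvIsClose t = false := by
          unfold pvIsOpen at ho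
          unfold pvIsClose
          simp at ho
          simp [ho]
        simp only [List.countP_cons, ho, hc] at hf
        simp only [pvNest, ho, if_true]
        apply ih (d + 1)
        · intro i hi
          have h := hp (i + 1) (by simp; omega)
          simp only [List.take_succ_cons, List.countP_cons, ho, hc] at h
          simp at h ⊢
          omega
        · simp at hf
          omega
      · by_cases hc : pvIsClose t = true
        · have hd : 0 < d := by
            have h := hp 1 (by simp)
            simp only [List.take_succ_cons, List.countP_cons, ho, hc] at h
            simp at h
            omega
          obtain ⟨d', rfl⟩ : ∃ d', d = d' + 1 := ⟨d - 1, by omega⟩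
          simp only [List.countP_cons, ho, hc] at hf
          simp only [pvNest, ho, hc, if_true]
          apply ih d'
          · intro i hi
            have h := hp (i + 1) (by simp; omega)
            simp only [List.take_succ_cons, List.countP_cons, ho, hc] at h
            simp at h ⊢
            omega
          · simp at hf
            omega
        · simp only [List.countP_cons, ho, hc] at hf
          simp only [pvNest, ho, hc]
          apply ih d
          · intro i hi
            have h := hp (i + 1) (by simp; omega)
            simp only [List.take_succ_cons, List.countP_cons, ho, hc] at h
            simp at h ⊢
            omega
          · simp at hf
            omega

-- the rest pvParse leaves behind is a suffix of its input
theorem pvParse_rest_suffix : ∀ (f : Nat) (acc ts : List String),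
    (pvParse f acc ts).2.1 <:+ ts := by
  intro f
  induction f with
  | zero =>
      intro acc ts
      cases ts <;> simp [pvParse]
  | succ f ih =>
      intro acc ts
      cases ts with
      | nil => simp [pvParse]
      | cons t ts =>
        by_cases ho : pvIsOpen t = true
        · simp only [pvParse, ho, if_pos]
          rcases h1 : pvParse f [] ts with ⟨blk, rest, c⟩
          have hr : rest <:+ ts := by have := ih [] ts; rw [h1] at this; exact this
          cases c with
          | true =>
              simp only
              exact ((ih (acc ++ blk) rest).trans hr).trans (List.suffix_cons t ts)
          | false =>
              simpa using hr.trans (List.suffix_cons t ts)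
        · by_cases hc : pvIsClose t = true
          · simp [pvParse, ho, hc, List.suffix_cons]
          · simp only [pvParse, ho, hc]
            exact (ih (acc ++ [t]) ts).trans (List.suffix_cons t ts)

-- SIMULATION, inner level: if ts closes one still-open bracket (depth d+1 → d at the close
-- that pvParse stops at), then A's fold with the saved length on top of the stack agrees with
-- pvParse: it pops that frame and continues on the rest with out0 ++ result.
theorem pvClose1 : ∀ (f : Nat) (ts : List String), ts.length < f → ∀ (acc : List String) (d : Nat),
    pvNest (d + 1) ts = true →
    (pvParse f acc ts).2.2 = true ∧
    pvNest d (pvParse f acc ts).2.1 = true ∧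
    ∀ (out0 : List String) (stack : List Nat),
      List.foldl pvStepA (out0.length :: stack, out0 ++ acc) ts
        = List.foldl pvStepA (stack, out0 ++ (pvParse f acc ts).1) (pvParse f acc ts).2.1 := by
  intro f
  induction f with
  | zero => intro ts h; omega
  | succ f ih =>
      intro ts hlen acc d hnest
      cases ts with
      | nil => simp [pvNest] at hnest
      | cons t ts =>
        by_cases ho : pvIsOpen t = true
        · -- '(' : recurse one level deeper, then continue at this level
          have hnest' : pvNest (d + 1 + 1) ts = true := by
            simpa [pvNest, ho] using hnest
          have hts : ts.length < f := by simp at hlen; omega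
          obtain ⟨hc1, hn1, hF1⟩ := ih ts hts [] (d + 1) hnest'
          rcases h1 : pvParse f [] ts with ⟨blk, rest, c⟩
          rw [h1] at hc1 hn1 hF1
          simp only at hc1 hn1 hF1
          subst hc1
          have hrest : rest.length < f := by
            have := (pvParse_rest_suffix f [] ts)
            rw [h1] at this
            exact lt_of_le_of_lt this.length_le hts
          obtain ⟨hc2, hn2, hF2⟩ := ih rest hrest (acc ++ blk) d hn1
          have hpar : pvParse (f + 1) acc (t :: ts) = pvParse f (acc ++ blk) rest := by
            simp [pvParse, ho, h1]
          rw [hpar]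
          refine ⟨hc2, hn2, ?_⟩
          intro out0 stack
          have step : pvStepA (out0.length :: stack, out0 ++ acc) t
              = ((out0 ++ acc).length :: out0.length :: stack, out0 ++ acc) := by
            simp [pvStepA, ho]
          rw [List.foldl_cons, step]
          have := hF1 (out0 ++ acc) (out0.length :: stack)
          rw [List.append_nil] at this
          rw [this]
          rw [List.append_assoc]
          exact hF2 out0 stack
        · by_cases hc : pvIsClose t = true
          · -- ')' : pvParse returns; A pops the frame
            have hnest' : pvNest d ts = true := by
              simpa [pvNest, ho, hc] using hnest
            have hpar : pvParse (f + 1) acc (t :: ts)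
                = ((List.replicate (pvRep t).toNat acc).flatten, ts, true) := by
              simp [pvParse, ho, hc]
            rw [hpar]
            refine ⟨rfl, hnest', ?_⟩
            intro out0 stack
            have step : pvStepA (out0.length :: stack, out0 ++ acc) t
                = (stack, out0 ++ (List.replicate (pvRep t).toNat acc).flatten) := by
              simp only [pvStepA, ho, hc, if_true]
              simp
            rw [List.foldl_cons, step]
          · -- plain token
            have hnest' : pvNest (d + 1) ts = true := by
              simpa [pvNest, ho, hc] using hnest
            have hts : ts.length < f := by simp at hlen; omega
            obtain ⟨hc1, hn1, hF1⟩ := ih ts hts (acc ++ [t]) d hnest'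
            have hpar : pvParse (f + 1) acc (t :: ts) = pvParse f (acc ++ [t]) ts := by
              simp [pvParse, ho, hc]
            rw [hpar]
            refine ⟨hc1, hn1, ?_⟩
            intro out0 stack
            have step : pvStepA (out0.length :: stack, out0 ++ acc) t
                = (out0.length :: stack, out0 ++ (acc ++ [t])) := by
              simp [pvStepA, ho, hc]
            rw [List.foldl_cons, step]
            exact hF1 out0 stack

-- SIMULATION, top level: on a balanced suffix A's fold just appends pvParse's output
theorem pvTop : ∀ (f : Nat) (ts : List String), ts.length < f → ∀ (acc : List String),
    pvNest 0 ts = true →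
    ∀ (out0 : List String) (stack : List Nat),
      List.foldl pvStepA (stack, out0 ++ acc) ts = (stack, out0 ++ (pvParse f acc ts).1) := by
  intro f
  induction f with
  | zero => intro ts h; omega
  | succ f ih =>
      intro ts hlen acc hnest out0 stack
      cases ts with
      | nil => simp [pvParse]
      | cons t ts =>
        by_cases ho : pvIsOpen t = true
        · have hnest' : pvNest 1 ts = true := by
            simpa [pvNest, ho] using hnest
          have hts : ts.length < f := by simp at hlen; omega
          obtain ⟨hc1, hn1, hF1⟩ := pvClose1 f ts hts [] 0 hnest'
          rcases h1 : pvParse f [] ts with ⟨blk, rest, c⟩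
          rw [h1] at hc1 hn1 hF1
          simp only at hc1 hn1 hF1
          subst hc1
          have hrest : rest.length < f := by
            have := (pvParse_rest_suffix f [] ts)
            rw [h1] at this
            exact lt_of_le_of_lt this.length_le hts
          have hpar : pvParse (f + 1) acc (t :: ts) = pvParse f (acc ++ blk) rest := by
            simp [pvParse, ho, h1]
          rw [hpar]
          have step : pvStepA (stack, out0 ++ acc) t
              = ((out0 ++ acc).length :: stack, out0 ++ acc) := by
            simp [pvStepA, ho]
          rw [List.foldl_cons, step]
          have h2 := hF1 (out0 ++ acc) stack
          rw [List.append_nil] at h2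
          rw [h2]
          rw [List.append_assoc]
          exact ih rest hrest (acc ++ blk) hn1 out0 stack
        · by_cases hc : pvIsClose t = true
          · simp [pvNest, ho, hc] at hnest
          · have hnest' : pvNest 0 ts = true := by
              simpa [pvNest, ho, hc] using hnest
            have hts : ts.length < f := by simp at hlen; omega
            have hpar : pvParse (f + 1) acc (t :: ts) = pvParse f (acc ++ [t]) ts := by
              simp [pvParse, ho, hc]
            rw [hpar]
            have step : pvStepA (stack, out0 ++ acc) t
                = (stack, out0 ++ (acc ++ [t])) := by
              simp [pvStepA, ho, hc]
            rw [List.foldl_cons, step]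
            exact ih ts hts (acc ++ [t]) hnest' out0 stack

-- ===== VERDICT (by name: the statement is the Claim_ definition above) =====
theorem unbracket_spec : Claim_equal_unbracket := by
  intro tokens _ hpre
  obtain ⟨-, -, hp, hf⟩ := hpre
  have hnest : pvNest 0 tokens = true := by
    apply pvNest_of_counts
    · intro i hi; simpa using hp i hi
    · simpa using hf
  unfold Spec_unbracket unbracket unbracket_alt
  have := pvTop (tokens.length + 1) tokens (by omega) [] hnest [] []
  simp only [List.nil_append] at this
  rw [this]
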